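-- pv_equiv track=rewrite | github.com/atharva-mandar-phatak/BT3040_Bioinformatics_IITMadras | BioInfo_Saidhar/Assignments/Assignment 4/BE19B029_A4_Q1.py | matchstr
-- ===== SOURCE A (Python) =====
-- def matchstr(s1, s2):
--     seq=[]
--     seqrev=[]
--     tempstr=''
--     for i in range(len(s1)):
--         if s1[i]==s2[i]:
--             tempstr+=s1[i]
--         else:
--             seq.append(tempstr)
--             tempstr=''
--     return seq
-- ===== SOURCE B (Python) =====
-- def matchstr(s1, s2):
--     mism = [i for i in range(len(s1)) if s1[i] != s2[i]]
--     seq = []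
--     prev = -1
--     for m in mism:
--         seq.append(s1[prev + 1:m])
--         prev = m
--     return seq
-- ===== Notes on version B (the rewrite author's own statement) =====
-- stated objective: alternative
-- what changed: Replaces the single stateful loop carrying a growing temp string by two passes: first collect the mismatch indices, then emit each segment as a slice s1[prev+1:m] between consecutive mismatches.
import Mathlib
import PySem

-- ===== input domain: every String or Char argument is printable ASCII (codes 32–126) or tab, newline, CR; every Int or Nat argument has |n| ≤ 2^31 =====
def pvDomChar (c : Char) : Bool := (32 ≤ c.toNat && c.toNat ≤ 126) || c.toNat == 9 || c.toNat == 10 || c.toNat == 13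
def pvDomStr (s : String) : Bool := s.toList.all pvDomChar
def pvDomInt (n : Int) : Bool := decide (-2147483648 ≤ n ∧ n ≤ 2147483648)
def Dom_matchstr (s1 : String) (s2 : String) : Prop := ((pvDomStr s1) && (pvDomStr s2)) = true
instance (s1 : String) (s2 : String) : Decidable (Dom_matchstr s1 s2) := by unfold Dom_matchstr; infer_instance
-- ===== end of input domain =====

-- B collects the mismatch indices in a first pass and then emits each run as the slice
-- s1[prev+1:m] between consecutive mismatches (alternative decomposition, same cost).

-- ===== PORT A =====
-- loop body of A: on match extend tempstr, on mismatch append tempstr to seq and reset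
def matchstrStep (c1 c2 : List Char) (st : List String × List Char) (i : Nat) :
    List String × List Char :=
  if c1.getD i ' ' = c2.getD i ' ' then (st.1, st.2 ++ [c1.getD i ' '])
  else (st.1 ++ [String.ofList st.2], [])

def matchstr (s1 : String) (s2 : String) : List String :=
  let c1 := s1.toList
  let c2 := s2.toList
  ((List.range c1.length).foldl (matchstrStep c1 c2) ([], [])).1

-- ===== PORT B =====
-- loop body of B: emit the slice s1[prev+1:m] for the mismatch index m, carrying prev
def matchstrAltStep (c1 : List Char) (st : List String × Int) (m : Nat) :
    List String × Int :=
  (st.1 ++ [String.ofList (PySem.List.slice c1 (some (st.2 + 1)) (some (m : Int)))], (m : Int))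

def matchstr_alt (s1 : String) (s2 : String) : List String :=
  let c1 := s1.toList
  let c2 := s2.toList
  let mism := (List.range c1.length).filter (fun i => c1.getD i ' ' != c2.getD i ' ')
  (mism.foldl (matchstrAltStep c1) ([], -1)).1

-- ===== PRECONDITION & SPEC =====
-- Pre_ excludes exactly the inputs with len(s2) < len(s1): there both A and B raise IndexError on s2[i].
def Pre_matchstr (s1 : String) (s2 : String) : Prop := s1.toList.length ≤ s2.toList.length
instance (s1 : String) (s2 : String) : Decidable (Pre_matchstr s1 s2) := by unfold Pre_matchstr; infer_instance

def pvWitness_matchstr : String × String := ("abcab", "abdac")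

def Spec_matchstr (s1 : String) (s2 : String) (out : List String) : Prop := out = matchstr_alt s1 s2
instance (s1 : String) (s2 : String) (out : List String) : Decidable (Spec_matchstr s1 s2 out) := by unfold Spec_matchstr; infer_instance

-- ===== CLAIM (what is proved, stated in full; the proofs are below) =====
def Claim_equal_matchstr : Prop := ∀ (s1 : String) (s2 : String), Dom_matchstr s1 s2 → Pre_matchstr s1 s2 → Spec_matchstr s1 s2 (matchstr s1 s2)

-- ===== LEMMAS AND PROOFS =====

lemma slice_snoc (c1 : List Char) (a n : Nat) (ha : a ≤ n) (hn : n < c1.length) :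
    PySem.List.slice c1 (some (a:Int)) (some (n:Int)) ++ [c1.getD n ' ']
      = PySem.List.slice c1 (some (a:Int)) (some ((n:Int)+1)) := by
  have h1 := PySem.List.slice_natCast (xs := c1) (a := a) (b := n)
  have h2 := PySem.List.slice_natCast (xs := c1) (a := a) (b := n+1)
  push_cast at h2
  rw [h1, h2]
  rw [show n+1-a = (n-a)+1 by omega, List.take_add_one]
  have hlt : n - a < (c1.drop a).length := by rw [List.length_drop]; omega
  rw [List.getElem?_eq_getElem hlt]
  have he : (c1.drop a)[n-a]'hlt = c1[n]'hn := by
    rw [List.getElem_drop]; congr 1; omega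
  rw [he, List.getD_eq_getElem c1 ' ' hn]
  simp

lemma slice_empty (c1 : List Char) (n : Nat) :
    PySem.List.slice c1 (some ((n:Int)+1)) (some ((n:Int)+1)) = [] := by
  have := PySem.List.slice_natCast (xs := c1) (a := n+1) (b := n+1)
  push_cast at this
  simp [this]

lemma matchstr_loop_inv (c1 c2 : List Char) (n : Nat) (hn : n ≤ c1.length) :
    ((List.range n).foldl (matchstrStep c1 c2) ([], [])).1
      = (((List.range n).filter (fun i => c1.getD i ' ' != c2.getD i ' ')).foldl
          (matchstrAltStep c1) ([], -1)).1
    ∧ ((List.range n).foldl (matchstrStep c1 c2) ([], [])).2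
      = PySem.List.slice c1
          (some ((((List.range n).filter (fun i => c1.getD i ' ' != c2.getD i ' ')).foldl
            (matchstrAltStep c1) ([], -1)).2 + 1)) (some (n : Int))
    ∧ -1 ≤ (((List.range n).filter (fun i => c1.getD i ' ' != c2.getD i ' ')).foldl
          (matchstrAltStep c1) ([], -1)).2
    ∧ (((List.range n).filter (fun i => c1.getD i ' ' != c2.getD i ' ')).foldl
          (matchstrAltStep c1) ([], -1)).2 < (n : Int) := by
  induction n with
  | zero =>
      refine ⟨rfl, ?_, by norm_num, by norm_num⟩
      norm_num
      simp [PySem.List.slice, PySem.List.clampIdx]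
  | succ n ih =>
      obtain ⟨ih1, ih2, ih3, ih4⟩ := ih (by omega)
      have hnlen : n < c1.length := by omega
      rw [List.range_succ, List.filter_append, List.foldl_append, List.foldl_append]
      set stA := (List.range n).foldl (matchstrStep c1 c2) ([], []) with hA
      set stB := ((List.range n).filter (fun i => c1.getD i ' ' != c2.getD i ' ')).foldl
          (matchstrAltStep c1) ([], -1) with hB
      by_cases h : c1.getD n ' ' = c2.getD n ' '
      · have hb : (c1.getD n ' ' != c2.getD n ' ') = false := by
          rw [bne_eq_false_iff_eq]; exact h
        have hf : (List.filter (fun i => c1.getD i ' ' != c2.getD i ' ') [n]) = [] := by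
          simp only [List.filter_singleton, hb, cond_false]
        rw [hf]
        simp only [List.foldl_cons, List.foldl_nil, matchstrStep, if_pos h]
        refine ⟨ih1, ?_, ih3, by push_cast; omega⟩
        rw [ih2]
        have ha : stB.2 + 1 = ((stB.2 + 1).toNat : Int) := by omega
        have hle : (stB.2 + 1).toNat ≤ n := by omega
        rw [ha]
        rw [slice_snoc c1 _ n hle hnlen]
        norm_cast
      · have hb : (c1.getD n ' ' != c2.getD n ' ') = true := by
          rw [bne_iff_ne]; exact h
        have hf : (List.filter (fun i => c1.getD i ' ' != c2.getD i ' ') [n]) = [n] := by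
          simp only [List.filter_singleton, hb, cond_true]
        rw [hf]
        simp only [List.foldl_cons, List.foldl_nil, matchstrStep, if_neg h, matchstrAltStep]
        refine ⟨by rw [ih1, ih2], ?_, by omega, by push_cast; omega⟩
        push_cast
        exact (slice_empty c1 n).symm

-- ===== VERDICT (by name: the statement is the Claim_ definition above) =====
theorem matchstr_spec : Claim_equal_matchstr := by
  intro s1 s2 _ _
  unfold Spec_matchstr matchstr matchstr_alt
  exact (matchstr_loop_inv s1.toList s2.toList s1.toList.length le_rfl).1
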